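-- pv_equiv track=rewrite | github.com/HaniaRezk/Python-projects | Armstrong and narcisssitic numbers.py | pluslonguemax
-- ===== SOURCE A (Python) =====
-- def majusscules():
--     return"ABCDEFGHIJKLMNOPQRSTUVWXYZ"
--
-- def pluslonguemax(ch):
--     ch1=majusscules()
--     i=0
--     z=0
--     while i<len(ch):
--         if ch[i] in ch1:
--             z=z+1
--         else:
--             z=0
--         i=i+1
--     return(z)
-- ===== SOURCE B (Python) =====
-- def pluslonguemax(ch):
--     ch1 = "ABCDEFGHIJKLMNOPQRSTUVWXYZ"
--     z = 0
--     i = len(ch) - 1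
--     while i >= 0:
--         if ch[i] in ch1:
--             z = z + 1
--         else:
--             break
--         i = i - 1
--     return z
-- ===== Notes on version B (the rewrite author's own statement) =====
-- stated objective: alternative
-- what changed: B scans the string backwards from the last character, counting consecutive uppercase letters and breaking at the first non-uppercase one, instead of A's forward pass that increments and resets a running counter over the whole string; the early break skips everything before the trailing run.
import Mathlib
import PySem

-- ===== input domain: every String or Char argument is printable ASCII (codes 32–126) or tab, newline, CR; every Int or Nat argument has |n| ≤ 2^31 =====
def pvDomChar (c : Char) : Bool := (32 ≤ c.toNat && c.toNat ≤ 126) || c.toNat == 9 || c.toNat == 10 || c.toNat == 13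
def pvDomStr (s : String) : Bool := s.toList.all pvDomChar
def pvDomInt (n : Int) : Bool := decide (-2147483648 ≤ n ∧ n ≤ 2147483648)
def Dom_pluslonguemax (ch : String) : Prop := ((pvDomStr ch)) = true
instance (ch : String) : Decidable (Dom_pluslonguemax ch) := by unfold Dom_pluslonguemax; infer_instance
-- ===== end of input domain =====

-- B scans the string backwards from the end with an early break at the first
-- non-uppercase character, instead of A's forward accumulate-and-reset pass.


-- ===== PORT A =====
def majusscules : String := "ABCDEFGHIJKLMNOPQRSTUVWXYZ"

-- the while loop over i = 0 .. len-1, reading ch[i], is a left fold over the characters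
def pluslonguemax (ch : String) : Int :=
  ch.toList.foldl (fun z c => if majusscules.toList.contains c then z + 1 else 0) 0

-- ===== PORT B =====
-- reverse scan: count consecutive uppercase letters from the end, break at the first other
def pvCountRev : List Char → Int
  | [] => 0
  | c :: rest => if majusscules.toList.contains c then 1 + pvCountRev rest else 0

def pluslonguemax_alt (ch : String) : Int := pvCountRev ch.toList.reverse

-- ===== PRECONDITION & SPEC =====
def Spec_pluslonguemax (ch : String) (out : Int) : Prop := out = pluslonguemax_alt ch
instance (ch : String) (out : Int) : Decidable (Spec_pluslonguemax ch out) := by unfold Spec_pluslonguemax; infer_instance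

-- ===== CLAIM (what is proved, stated in full; the proofs are below) =====
def Claim_equal_pluslonguemax : Prop := ∀ (ch : String), Dom_pluslonguemax ch → Spec_pluslonguemax ch (pluslonguemax ch)

-- ===== LEMMAS AND PROOFS =====
lemma pvCountRev_append (xs ys : List Char) :
    pvCountRev (xs ++ ys) =
      if xs.all (fun c => majusscules.toList.contains c) then (xs.length : Int) + pvCountRev ys
      else pvCountRev xs := by
  induction xs with
  | nil => simp [pvCountRev]
  | cons c xs ih =>
    by_cases hc : c ∈ majusscules.toList
    · simp only [List.cons_append, pvCountRev, List.contains_eq_mem, decide_eq_true_eq,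
        if_pos hc, ih, List.all_cons, Bool.and_eq_true, decide_eq_true_eq, List.length_cons]
      split_ifs with h1 h2 h2
      · push_cast; ring
      · exact absurd ⟨hc, h1⟩ h2
      · exact absurd h2.2 h1
      · rfl
    · simp [pvCountRev, List.contains_eq_mem, hc]

lemma foldl_eq_countRev (l : List Char) (z : Int) :
    l.foldl (fun z c => if majusscules.toList.contains c then z + 1 else 0) z =
      if l.all (fun c => majusscules.toList.contains c) then z + (l.length : Int)
      else pvCountRev l.reverse := by
  induction l generalizing z with
  | nil => simp
  | cons c l ih =>
    rw [List.foldl_cons, ih, List.reverse_cons, pvCountRev_append]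
    by_cases hc : majusscules.toList.contains c = true
    · simp only [hc, if_true, List.all_cons, Bool.true_and, List.all_reverse,
        List.length_cons, List.length_reverse]
      split_ifs with h1
      · push_cast; ring
      · rfl
    · simp only [hc, if_false, List.all_cons, Bool.false_and, Bool.false_eq_true,
        List.all_reverse, List.length_reverse, pvCountRev, if_neg hc, add_zero]
      split_ifs with h1
      · simp
      · rfl
-- ===== VERDICT (by name: the statement is the Claim_ definition above) =====
theorem pluslonguemax_spec : Claim_equal_pluslonguemax := by
  intro ch _
  show _ = _
  unfold pluslonguemax pluslonguemax_alt
  rw [foldl_eq_countRev]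
  by_cases h : ch.toList.all (fun c => majusscules.toList.contains c) = true
  · rw [if_pos h]
    have := pvCountRev_append ch.toList.reverse []
    simp only [List.append_nil, List.all_reverse, h, if_true, List.length_reverse,
      pvCountRev] at this
    omega
  · rw [if_neg h]
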